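-- pv_equiv track=rewrite | github.com/gerzytet/FlappySNES | create graphic.py | encode_char2
-- ===== SOURCE A (Python) =====
-- def encode_char2(s):
--     bpp = 2
--     rows = s.split('\n')
--     nums = [[int(c) for c in row] for row in rows]
--     result = []
--     for row in nums:
--         for plane in range(bpp):
--             byte = 0
--             #index = bpp - plane - 1
--             index = plane
--             for i, c in enumerate(row):
--                 byte <<= 1
--                 byte |= (c & (1 << index)) >> index
--             result.append(byte)
--     return result
-- ===== SOURCE B (Python) =====
-- def encode_char2(s):
--     # One fused pass per row: both bitplane bytes accumulated together.
--     result = []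
--     for row in s.split('\n'):
--         b0 = b1 = 0
--         for c in row:
--             d = int(c)
--             b0 = (b0 << 1) | (d & 1)
--             b1 = (b1 << 1) | ((d & 2) >> 1)
--         result.extend((b0, b1))
--     return result
-- ===== Notes on version B (the rewrite author's own statement) =====
-- stated objective: alternative
-- what changed: B encodes each row in a single fused pass accumulating both bitplane bytes at once, instead of A's separate per-plane passes over a pre-built digit matrix.
import Mathlib
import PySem

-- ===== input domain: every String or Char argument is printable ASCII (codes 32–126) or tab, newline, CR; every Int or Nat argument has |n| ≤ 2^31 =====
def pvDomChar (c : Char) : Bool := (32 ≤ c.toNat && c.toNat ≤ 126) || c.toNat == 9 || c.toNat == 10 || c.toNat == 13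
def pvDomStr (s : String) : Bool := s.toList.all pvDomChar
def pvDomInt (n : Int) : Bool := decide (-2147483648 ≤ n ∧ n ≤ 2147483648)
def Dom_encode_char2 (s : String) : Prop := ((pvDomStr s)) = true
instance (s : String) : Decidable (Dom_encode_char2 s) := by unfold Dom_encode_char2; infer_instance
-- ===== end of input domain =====

-- B fuses the two per-plane row passes of A into one pass keeping both plane bytes; alternative decomposition, same cost class.

-- ===== PORT A =====
def encode_char2 (s : String) : List Int :=
  let bpp : Nat := 2
  let rows := PySem.Chars.splitOn s.toList ['\n']
  -- int(c) raises on non-digit chars; Pre_ excludes those inputs, `.getD 0` totalizes the port there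
  let nums := rows.map (fun row => row.map (fun c => (PySem.Int.ofChars? [c]).getD 0))
  nums.foldl (fun result row =>
    (List.range bpp).foldl (fun result plane =>
      let index := plane
      let byte := row.foldl (fun byte c =>
        PySem.Int.bor (byte <<< 1) ((PySem.Int.band c ((1 : Int) <<< index)) >>> index)) 0
      result ++ [byte]) result) []

-- ===== PORT B =====
def encode_char2_alt (s : String) : List Int :=
  (PySem.Chars.splitOn s.toList ['\n']).foldl (fun result row =>
    let p := row.foldl (fun (p : Int × Int) c =>
      let d := (PySem.Int.ofChars? [c]).getD 0
      (PySem.Int.bor (p.1 <<< 1) (PySem.Int.band d 1),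
       PySem.Int.bor (p.2 <<< 1) ((PySem.Int.band d 2) >>> (1:Nat)))) ((0 : Int), (0 : Int))
    result ++ [p.1, p.2]) []

-- ===== PRECONDITION & SPEC =====
-- Pre_: Python A's int(c) raises ValueError unless every character of every row is a decimal digit.
def Pre_encode_char2 (s : String) : Prop :=
  (s.toList.all (fun c => c == '\n' || PySem.Chars.isdigit c)) = true
instance (s : String) : Decidable (Pre_encode_char2 s) := by unfold Pre_encode_char2; infer_instance
def pvWitness_encode_char2 : String := "103\n251"

def Spec_encode_char2 (s : String) (out : List Int) : Prop := out = encode_char2_alt s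
instance (s : String) (out : List Int) : Decidable (Spec_encode_char2 s out) := by unfold Spec_encode_char2; infer_instance

-- ===== CLAIM (what is proved, stated in full; the proofs are below) =====
def Claim_equal_encode_char2 : Prop := ∀ (s : String), Dom_encode_char2 s → Pre_encode_char2 s → Spec_encode_char2 s (encode_char2 s)

-- ===== LEMMAS AND PROOFS =====

-- B's fused row pass computes exactly A's two per-plane bytes.
lemma pv_fuse (row : List Char) : ∀ (b0 b1 : Int),
    (row.foldl (fun (p : Int × Int) c =>
      let d := (PySem.Int.ofChars? [c]).getD 0
      (PySem.Int.bor (p.1 <<< 1) (PySem.Int.band d 1),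
       PySem.Int.bor (p.2 <<< 1) ((PySem.Int.band d 2) >>> (1:Nat)))) (b0, b1))
  = ((row.map (fun c => (PySem.Int.ofChars? [c]).getD 0)).foldl
       (fun byte c => PySem.Int.bor (byte <<< 1) ((PySem.Int.band c ((1 : Int) <<< (0:Nat))) >>> (0:Nat))) b0,
     (row.map (fun c => (PySem.Int.ofChars? [c]).getD 0)).foldl
       (fun byte c => PySem.Int.bor (byte <<< 1) ((PySem.Int.band c ((1 : Int) <<< (1:Nat))) >>> (1:Nat))) b1) := by
  induction row with
  | nil => intro b0 b1; simp
  | cons c rest ih =>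
      intro b0 b1
      simp only [List.foldl_cons, List.map_cons]
      rw [ih]
      simp only [Prod.mk.injEq]
      constructor <;> congr 1 <;> congr 1 <;> norm_num

-- ===== VERDICT (by name: the statement is the Claim_ definition above) =====
theorem encode_char2_spec : Claim_equal_encode_char2 := by
  intro s _ _
  unfold Spec_encode_char2 encode_char2 encode_char2_alt
  simp only [List.foldl_map]
  congr 1
  funext result row
  simp only [List.range_succ, List.range_zero, List.nil_append,
    List.foldl_cons, List.foldl_nil, pv_fuse, List.foldl_map, List.append_assoc, List.cons_append,
    List.nil_append]
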